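-- pv_equiv track=rewrite | github.com/BenFoley2021/citation_prediction_from_google_scholar | data_cleaning_and_analysis/one_hot_encode_transformer.py | remove_synonym
-- ===== SOURCE A (Python) =====
-- def remove_synonym(setIn: set, synonyms: dict):
--     # removes anything from the set which was found to be a synonym
--     temp_set = set()
--     for thing in setIn:
--         if thing in synonyms:
--             temp_set.add(thing)
--
--     for thing2 in temp_set:
--         setIn.remove(thing2)
--
--     return setIn
-- ===== SOURCE B (Python) =====
-- def remove_synonym(setIn: set, synonyms: dict):
--     # single pass over the dict keys; discards each key from the set in place
--     for key in synonyms: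
--         setIn.discard(key)
--     return setIn
-- ===== Notes on version B (the rewrite author's own statement) =====
-- stated objective: simpler
-- what changed: Replaces the two-pass scheme (scan the set collecting synonym keys into a temp set, then remove each collected element) with one loop over the dict keys that discards each key from the set directly; the temp set and the scan over setIn disappear.
import Mathlib
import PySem

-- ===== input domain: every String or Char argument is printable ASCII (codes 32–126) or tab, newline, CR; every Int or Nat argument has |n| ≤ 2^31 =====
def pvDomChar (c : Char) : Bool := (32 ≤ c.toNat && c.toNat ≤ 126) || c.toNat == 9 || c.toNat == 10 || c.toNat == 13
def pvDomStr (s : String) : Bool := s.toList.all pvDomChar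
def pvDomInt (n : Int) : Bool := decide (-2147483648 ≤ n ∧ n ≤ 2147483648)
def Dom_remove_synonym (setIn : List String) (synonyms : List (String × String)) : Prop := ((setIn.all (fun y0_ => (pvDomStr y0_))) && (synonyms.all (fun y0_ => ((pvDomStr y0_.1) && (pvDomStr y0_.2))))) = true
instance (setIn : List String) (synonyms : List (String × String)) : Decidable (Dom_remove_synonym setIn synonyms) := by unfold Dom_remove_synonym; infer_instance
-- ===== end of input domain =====

-- B replaces A's two passes (collect synonym keys from the set into a temp set, then remove each)
-- by one loop over the dict keys discarding each from the set. Both mutate setIn in place in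
-- Python and return the same object; the theorems here are about the returned value.

-- ===== PORT A =====
def remove_synonym (setIn : List String) (synonyms : List (String × String)) : List String :=
  let syn := PySem.Dict.ofList synonyms
  let temp_set := setIn.foldl
    (fun t thing => if syn.contains thing then PySem.Set.add t thing else t) PySem.Set.empty
  -- setIn.remove(thing2): Set.remove? returns none only when thing2 is absent (KeyError); every
  -- element of temp_set is in the current set, so the .getD fallback is unreachable.
  temp_set.foldl (fun s thing2 => (PySem.Set.remove? s thing2).getD s) setIn

-- ===== PORT B =====
def remove_synonym_alt (setIn : List String) (synonyms : List (String × String)) : List String :=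
  (PySem.Dict.ofList synonyms).keys.foldl (fun s key => PySem.Set.discard s key) setIn

-- ===== PRECONDITION & SPEC =====
def Spec_remove_synonym (setIn : List String) (synonyms : List (String × String)) (out : List String) : Prop := out = remove_synonym_alt setIn synonyms
instance (setIn : List String) (synonyms : List (String × String)) (out : List String) : Decidable (Spec_remove_synonym setIn synonyms out) := by unfold Spec_remove_synonym; infer_instance

-- ===== CLAIM (what is proved, stated in full; the proofs are below) =====
def Claim_equal_remove_synonym : Prop := ∀ (setIn : List String) (synonyms : List (String × String)), Dom_remove_synonym setIn synonyms → Spec_remove_synonym setIn synonyms (remove_synonym setIn synonyms)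

-- ===== LEMMAS AND PROOFS =====

-- set.remove with a fallback to the unchanged set is exactly discard
lemma removeD_eq_discard (s : List String) (y : String) :
    (PySem.Set.remove? s y).getD s = PySem.Set.discard s y := by
  by_cases h : y ∈ s
  · rw [PySem.Set.remove?_of_mem h]; rfl
  · rw [(PySem.Set.remove?_eq_none_iff s y).2 h]
    simp [PySem.Set.discard]
    exact (List.filter_eq_self.2 (fun a ha => by simp; rintro rfl; exact h ha)).symm

-- folding discard over a list of values filters out exactly those values
lemma foldl_discard_eq_filter (ys : List String) (s : List String) :
    ys.foldl (fun s y => PySem.Set.discard s y) s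
      = s.filter (fun x => !ys.contains x) := by
  induction ys generalizing s with
  | nil => simp
  | cons y ys ih =>
      rw [List.foldl_cons, ih]
      simp only [PySem.Set.discard, List.filter_filter]
      apply List.filter_congr
      intro x _
      by_cases h : x = y <;> simp [h]

-- membership in A's temp set: the elements of setIn satisfying the test c
lemma mem_temp (setIn : List String) (c : String → Bool) (t : List String) (x : String) :
    x ∈ setIn.foldl (fun t thing => if c thing then PySem.Set.add t thing else t) t
      ↔ x ∈ t ∨ (x ∈ setIn ∧ c x) := by
  induction setIn generalizing t with
  | nil => simp
  | cons a l ih =>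
      rw [List.foldl_cons]
      by_cases h : c a = true
      · rw [if_pos h, ih]
        simp only [PySem.Set.mem_add, List.mem_cons]
        constructor
        · rintro (⟨hx | rfl⟩ | ⟨hl, hc⟩)
          · exact .inl hx
          · exact .inr ⟨.inl rfl, h⟩
          · exact .inr ⟨.inr hl, hc⟩
        · rintro (hx | ⟨rfl | hl, hc⟩)
          · exact .inl (.inl hx)
          · exact .inl (.inr rfl)
          · exact .inr ⟨hl, hc⟩
      · rw [if_neg h, ih]
        simp only [List.mem_cons]
        constructor
        · rintro (hx | ⟨hl, hc⟩)
          · exact .inl hx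
          · exact .inr ⟨.inr hl, hc⟩
        · rintro (hx | ⟨rfl | hl, hc⟩)
          · exact .inl hx
          · exact absurd hc h
          · exact .inr ⟨hl, hc⟩

-- dict key membership test equals membership in the key list
lemma contains_iff_mem_keys (d : PySem.Dict String String) (x : String) :
    d.contains x = true ↔ x ∈ d.keys := by
  simp [PySem.Dict.contains, PySem.Dict.keys, List.any_eq_true]

-- ===== VERDICT (by name: the statement is the Claim_ definition above) =====
theorem remove_synonym_spec : Claim_equal_remove_synonym := by
  intro setIn synonyms _
  unfold Spec_remove_synonym remove_synonym remove_synonym_alt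
  simp only [removeD_eq_discard, foldl_discard_eq_filter]
  apply List.filter_congr
  intro x hx
  have hcont : ∀ (l : List String), l.contains x = decide (x ∈ l) := fun l => by simp
  rw [hcont, hcont]
  congr 1
  rw [decide_eq_decide,
    mem_temp setIn (fun t => (PySem.Dict.ofList synonyms).contains t) PySem.Set.empty x,
    ← contains_iff_mem_keys (PySem.Dict.ofList synonyms) x]
  simp [PySem.Set.empty, hx]
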